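-- pv_equiv track=rewrite | github.com/suoweikeji-liqiang/-wasc-grounded-search-skill | skill/synthesis/orchestrate.py | _contains_marker
-- ===== SOURCE A (Python) =====
-- def _contains_marker(
--     normalized_query: str,
--     tokens: set[str],
--     markers: frozenset[str],
-- ) -> bool:
--     return any(
--         (marker in tokens) if marker.isascii() else (marker in normalized_query)
--         for marker in markers
--     )
-- ===== SOURCE B (Python) =====
-- def _contains_marker(
--     normalized_query: str,
--     tokens: set[str],
--     markers: frozenset[str],
-- ) -> bool:
--     # Reversed join direction for the ASCII check: scan the TOKENS against the
--     # marker set (a token equal to an ASCII marker is itself ASCII, so this is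
--     # exactly "some ASCII marker is in tokens"), then scan the query for the
--     # non-ASCII markers.
--     if any(t.isascii() and t in markers for t in tokens):
--         return True
--     return any(not m.isascii() and m in normalized_query for m in markers)
-- ===== Notes on version B (the rewrite author's own statement) =====
-- stated objective: alternative
-- what changed: A makes one interleaved pass over markers with a per-marker conditional; B inverts the join direction for the set check - it scans the tokens against the marker set (valid because a token equal to an ASCII marker is itself ASCII) and only then scans the query for the non-ASCII markers, with an early return between the two stages.
import Mathlib
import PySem

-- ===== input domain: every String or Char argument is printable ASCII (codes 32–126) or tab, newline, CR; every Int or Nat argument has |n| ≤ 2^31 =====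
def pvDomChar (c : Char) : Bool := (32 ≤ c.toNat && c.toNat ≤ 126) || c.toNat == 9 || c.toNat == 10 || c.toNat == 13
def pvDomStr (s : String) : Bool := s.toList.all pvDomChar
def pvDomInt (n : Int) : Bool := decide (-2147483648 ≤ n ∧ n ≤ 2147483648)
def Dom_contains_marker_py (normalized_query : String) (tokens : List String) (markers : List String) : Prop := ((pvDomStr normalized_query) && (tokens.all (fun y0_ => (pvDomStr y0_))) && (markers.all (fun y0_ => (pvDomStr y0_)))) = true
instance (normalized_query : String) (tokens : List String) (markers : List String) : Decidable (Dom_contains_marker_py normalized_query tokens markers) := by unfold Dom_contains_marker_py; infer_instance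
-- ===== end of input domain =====

-- B inverts the join direction of A's set check: it scans the TOKENS against the marker
-- set (a token equal to an ASCII marker is itself ASCII), then scans the query for the
-- non-ASCII markers (objective: alternative decomposition).

-- ===== PORT A =====
-- str.isascii(): all characters have code points below 128 (exact; hand-ported, no PySem primitive)
def pyIsAscii (s : String) : Bool := s.toList.all (fun c => c.toNat < 128)

def contains_marker_py (normalized_query : String) (tokens : List String) (markers : List String) : Bool :=
  markers.any (fun marker =>
    if pyIsAscii marker then PySem.Set.contains tokens marker
    else PySem.Str.isIn marker normalized_query)

-- ===== PORT B =====
def contains_marker_py_alt (normalized_query : String) (tokens : List String) (markers : List String) : Bool :=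
  if tokens.any (fun t => pyIsAscii t && PySem.Set.contains markers t) then true
  else markers.any (fun m => !pyIsAscii m && PySem.Str.isIn m normalized_query)

-- ===== PRECONDITION & SPEC =====
def Spec_contains_marker_py (normalized_query : String) (tokens : List String) (markers : List String) (out : Bool) : Prop := out = contains_marker_py_alt normalized_query tokens markers
instance (normalized_query : String) (tokens : List String) (markers : List String) (out : Bool) : Decidable (Spec_contains_marker_py normalized_query tokens markers out) := by unfold Spec_contains_marker_py; infer_instance

-- ===== CLAIM (what is proved, stated in full; the proofs are below) =====
def Claim_equal_contains_marker_py : Prop := ∀ (normalized_query : String) (tokens : List String) (markers : List String), Dom_contains_marker_py normalized_query tokens markers → Spec_contains_marker_py normalized_query tokens markers (contains_marker_py normalized_query tokens markers)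

-- ===== LEMMAS AND PROOFS =====

-- the ASCII half of A's test, read in the opposite join direction
lemma ascii_join_swap (tokens markers : List String) :
    (markers.any fun m => pyIsAscii m && PySem.Set.contains tokens m)
      = (tokens.any fun t => pyIsAscii t && PySem.Set.contains markers t) := by
  simp only [List.any_eq, PySem.Set.contains, List.contains_eq_mem, Bool.and_eq_true,
    decide_eq_true_eq, decide_eq_decide]
  constructor
  · rintro ⟨m, hm, ha, ht⟩; exact ⟨m, ht, ha, hm⟩
  · rintro ⟨t, ht, ha, hm⟩; exact ⟨t, hm, ha, ht⟩

-- A's single interleaved pass splits into the ASCII part and the non-ASCII part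
lemma split_pass (q : String) (tokens markers : List String) :
    (markers.any fun m =>
        if pyIsAscii m then PySem.Set.contains tokens m else PySem.Str.isIn m q)
      = ((markers.any fun m => pyIsAscii m && PySem.Set.contains tokens m) ||
         (markers.any fun m => !pyIsAscii m && PySem.Str.isIn m q)) := by
  induction markers with
  | nil => simp
  | cons m tl ih =>
    simp only [List.any_cons, ih]
    by_cases h : pyIsAscii m <;> simp [h] <;>
      cases PySem.Set.contains tokens m <;> simp [Bool.or_assoc, Bool.or_left_comm]

-- ===== VERDICT (by name: the statement is the Claim_ definition above) =====
theorem contains_marker_py_spec : Claim_equal_contains_marker_py := by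
  intro q tokens markers _
  unfold Spec_contains_marker_py contains_marker_py contains_marker_py_alt
  rw [split_pass, ascii_join_swap]
  cases h : tokens.any fun t => pyIsAscii t && PySem.Set.contains markers t <;> simp
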